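-- pv_equiv track=rewrite | github.com/isranii/Air-Piano | air_piano.py | get_chord_name
-- ===== SOURCE A (Python) =====
-- def get_chord_name(notes):
--     """
--     Determines a simple chord name (e.g., C Maj, D Min, C4) from a list of MIDI notes.
--     This is a heuristic and can be expanded for more complex chord types.
--     """
--     if not notes:
--         return "---"
--
--     sorted_notes = sorted(notes)
--     root_midi = sorted_notes[0]
--     # Get raw note name (e.g., "C4"), then strip octave for cleaner display on key
--     root_name_raw = MusicTheoryHelper.note_to_name(root_midi)
--     root_name = ''.join([char for char in root_name_raw if not char.isdigit() and char not in ['-', '+']])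
--
--     if len(sorted_notes) == 1:
--         return f"{root_name}" # For single notes, just show the note name
--
--     if len(sorted_notes) == 2:
--         # Simple interval naming for two notes
--         interval = sorted_notes[1] - sorted_notes[0]
--         if interval == 3: return f"{root_name} m3" # Minor 3rd
--         if interval == 4: return f"{root_name} M3" # Major 3rd
--         if interval == 7: return f"{root_name} P5" # Perfect 5th
--         return f"{root_name} Pair" # Generic for other 2-note combinations
--
--     if len(sorted_notes) >= 3:
--         # Check for common triad intervals from the root
--         interval1 = sorted_notes[1] - sorted_notes[0]
--         interval2 = sorted_notes[2] - sorted_notes[1]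
--
--         if interval1 == 4 and interval2 == 3: # Root, Major 3rd, Perfect 5th
--             return f"{root_name} Maj"
--         elif interval1 == 3 and interval2 == 4: # Root, Minor 3rd, Perfect 5th
--             return f"{root_name} Min"
--         elif interval1 == 5 and interval2 == 2: # e.g., C-F-G (C Sus4)
--             return f"{root_name} Sus4"
--         elif interval1 == 2 and interval2 == 5: # e.g., C-D-G (C Sus2)
--             return f"{root_name} Sus2"
--         else:
--             return f"{root_name} Triad" # Generic for other 3-note combinations
--     return "Chord" # Fallback for other note combinations
--
-- class MusicTheoryHelper:
--     """Helper class for music theory operations, e.g., converting MIDI notes to names."""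
--     @staticmethod
--     def note_to_name(midi_note):
--         """Converts a MIDI note number (0-127) to its musical note name with octave (e.g., 60 -> C4)."""
--         note_names = ['C', 'C#', 'D', 'D#', 'E', 'F', 'F#', 'G', 'G#', 'A', 'A#', 'B']
--         # MIDI note 0 is C-1 (octave -1), so C4 is MIDI note 60 (octave 4)
--         octave = (midi_note // 12) - 1
--         note_name = note_names[midi_note % 12]
--         return f"{note_name}{octave}"
--
--     @staticmethod
--     def generate_chord_progression(key_root_midi=60, progression_type='I-V-vi-IV'):
--         """
--         Generates a list of MIDI root notes for a common chord progression in a given key.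
--         This is a conceptual helper and not directly used in the main piano logic currently.
--         """
--         # Intervals relative to the root of the I chord (e.g., in C Major: C=0)
--         progressions = {
--             'I-V-vi-IV': [0, 7, 9, 5],  # C-G-Am-F (relative to C)
--             'vi-IV-I-V': [9, 5, 0, 7],  # Am-F-C-G (relative to C)
--             'I-vi-IV-V': [0, 9, 5, 7],  # C-Am-F-G (relative to C)
--         }
--
--         intervals = progressions.get(progression_type, progressions['I-V-vi-IV'])
--         return [key_root_midi + interval for interval in intervals]
-- ===== SOURCE B (Python) =====
-- _NOTE_NAMES = ['C', 'C#', 'D', 'D#', 'E', 'F', 'F#', 'G', 'G#', 'A', 'A#', 'B']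
-- _PAIR = {3: 'm3', 4: 'M3', 7: 'P5'}
-- _TRIAD = {(4, 3): 'Maj', (3, 4): 'Min', (5, 2): 'Sus4', (2, 5): 'Sus2'}
--
--
-- def get_chord_name(notes):
--     if not notes:
--         return "---"
--     # Single pass: keep only the three smallest notes in ascending order
--     # (the chord name depends on nothing else), instead of sorting the list.
--     top = []
--     for v in notes:
--         i = 0
--         while i < len(top) and top[i] <= v:
--             i += 1
--         top.insert(i, v)
--         del top[3:]
--     root = _NOTE_NAMES[top[0] % 12]
--     n = len(notes)
--     if n == 1:
--         return root
--     if n == 2: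
--         suffix = _PAIR.get(top[1] - top[0], 'Pair')
--     else:
--         suffix = _TRIAD.get((top[1] - top[0], top[2] - top[1]), 'Triad')
--     return f"{root} {suffix}"
-- ===== Notes on version B (the rewrite author's own statement) =====
-- stated objective: alternative
-- what changed: B never sorts: a single pass keeps a bounded buffer of the three smallest notes (all the classification needs), derives the root directly as NOTE_NAMES[min % 12] instead of building the octave string and stripping digits, and names the chord from small lookup tables.
import Mathlib
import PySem

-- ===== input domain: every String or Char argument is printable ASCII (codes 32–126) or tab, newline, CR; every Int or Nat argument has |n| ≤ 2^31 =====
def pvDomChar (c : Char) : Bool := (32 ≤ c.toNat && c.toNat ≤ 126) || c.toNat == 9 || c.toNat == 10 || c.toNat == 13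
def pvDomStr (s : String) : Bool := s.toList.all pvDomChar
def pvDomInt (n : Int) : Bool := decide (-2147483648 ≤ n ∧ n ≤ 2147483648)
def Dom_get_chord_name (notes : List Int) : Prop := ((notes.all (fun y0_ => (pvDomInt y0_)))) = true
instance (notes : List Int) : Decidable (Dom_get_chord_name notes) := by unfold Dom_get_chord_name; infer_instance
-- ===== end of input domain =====

-- B never sorts: one pass keeps a bounded buffer of the three smallest notes (all the
-- classification needs), names the root directly from NOTE_NAMES[min % 12] instead of
-- building the octave string and stripping digits, and picks the suffix from lookup tables.

-- ===== PORT A =====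
-- note_names of MusicTheoryHelper.note_to_name, as char lists (f-string concat = list append)
def pvNoteNames : List (List Char) :=
  [['C'], ['C','#'], ['D'], ['D','#'], ['E'], ['F'], ['F','#'], ['G'], ['G','#'], ['A'], ['A','#'], ['B']]

-- MusicTheoryHelper.note_to_name: f"{note_name}{octave}"
def pvNoteToName (midi : Int) : List Char :=
  (PySem.List.pyGetD pvNoteNames (PySem.Int.mod midi 12) []) ++
    PySem.Int.toChars (PySem.Int.floordiv midi 12 - 1)

-- the comprehension's filter: not char.isdigit() and char not in ['-', '+']
def pvKeep (c : Char) : Bool := !(PySem.Chars.isdigit c) && !(c == '-' || c == '+')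

def get_chord_name (notes : List Int) : String :=
  if notes = [] then "---" else
  let sorted_notes := PySem.List.sorted notes (fun x => x) false
  let root_midi := PySem.List.pyGetD sorted_notes 0 0
  let root_name := (pvNoteToName root_midi).filter pvKeep
  if sorted_notes.length = 1 then String.ofList root_name
  else if sorted_notes.length = 2 then
    let interval := PySem.List.pyGetD sorted_notes 1 0 - PySem.List.pyGetD sorted_notes 0 0
    if interval = 3 then String.ofList (root_name ++ [' ','m','3'])
    else if interval = 4 then String.ofList (root_name ++ [' ','M','3'])
    else if interval = 7 then String.ofList (root_name ++ [' ','P','5'])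
    else String.ofList (root_name ++ [' ','P','a','i','r'])
  else if 3 ≤ sorted_notes.length then
    let interval1 := PySem.List.pyGetD sorted_notes 1 0 - PySem.List.pyGetD sorted_notes 0 0
    let interval2 := PySem.List.pyGetD sorted_notes 2 0 - PySem.List.pyGetD sorted_notes 1 0
    if interval1 = 4 ∧ interval2 = 3 then String.ofList (root_name ++ [' ','M','a','j'])
    else if interval1 = 3 ∧ interval2 = 4 then String.ofList (root_name ++ [' ','M','i','n'])
    else if interval1 = 5 ∧ interval2 = 2 then String.ofList (root_name ++ [' ','S','u','s','4'])
    else if interval1 = 2 ∧ interval2 = 5 then String.ofList (root_name ++ [' ','S','u','s','2'])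
    else String.ofList (root_name ++ [' ','T','r','i','a','d'])
  else "Chord"

-- ===== PORT B =====
-- Source B's own _NOTE_NAMES table
def pvNoteNamesB : List (List Char) :=
  [['C'], ['C','#'], ['D'], ['D','#'], ['E'], ['F'], ['F','#'], ['G'], ['G','#'], ['A'], ['A','#'], ['B']]

def pvPair : PySem.Dict Int (List Char) :=
  ((PySem.Dict.empty.insert 3 ['m','3']).insert 4 ['M','3']).insert 7 ['P','5']

def pvTriad : PySem.Dict (Int × Int) (List Char) :=
  (((PySem.Dict.empty.insert (4,3) ['M','a','j']).insert (3,4) ['M','i','n']).insert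
    (5,2) ['S','u','s','4']).insert (2,5) ['S','u','s','2']

-- Source B's inner while: walk past the elements ≤ v, insert v there
def pvIns (v : Int) : List Int → List Int
  | [] => [v]
  | a :: rest => if a ≤ v then a :: pvIns v rest else v :: a :: rest

-- Source B's loop body: insert v, then `del top[3:]`
def pvStep (top : List Int) (v : Int) : List Int := (pvIns v top).take 3

def get_chord_name_alt (notes : List Int) : String :=
  if notes = [] then "---" else
  let top := notes.foldl pvStep []
  let root := PySem.List.pyGetD pvNoteNamesB (PySem.Int.mod (PySem.List.pyGetD top 0 0) 12) []
  let n := notes.length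
  if n = 1 then String.ofList root
  else
    let suffix :=
      if n = 2 then
        pvPair.getD (PySem.List.pyGetD top 1 0 - PySem.List.pyGetD top 0 0) ['P','a','i','r']
      else
        pvTriad.getD (PySem.List.pyGetD top 1 0 - PySem.List.pyGetD top 0 0,
                      PySem.List.pyGetD top 2 0 - PySem.List.pyGetD top 1 0) ['T','r','i','a','d']
    String.ofList (root ++ ' ' :: suffix)

-- ===== PRECONDITION & SPEC =====
def Spec_get_chord_name (notes : List Int) (out : String) : Prop := out = get_chord_name_alt notes
instance (notes : List Int) (out : String) : Decidable (Spec_get_chord_name notes out) := by unfold Spec_get_chord_name; infer_instance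

-- ===== CLAIM (what is proved, stated in full; the proofs are below) =====
def Claim_equal_get_chord_name : Prop := ∀ (notes : List Int), Dom_get_chord_name notes → Spec_get_chord_name notes (get_chord_name notes)

-- ===== LEMMAS AND PROOFS =====

-- Source B's hand-written insertion is PySem's insertBy with `before a b = a < b`
lemma pvIns_eq_insertBy (v : Int) : ∀ l : List Int,
    pvIns v l = PySem.List.insertBy (fun a b => decide (a < b)) v l := by
  intro l
  induction l with
  | nil => rfl
  | cons a rest ih =>
    by_cases h : a ≤ v
    · have : ¬ v < a := not_lt.mpr h
      simp [pvIns, PySem.List.insertBy, h, this, ih]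
    · have : v < a := lt_of_not_ge h
      simp [pvIns, PySem.List.insertBy, h, this]

-- inserting into a truncated buffer and re-truncating = truncating the full insertion
lemma take_pvIns (v : Int) : ∀ (k : Nat) (l : List Int),
    (pvIns v (l.take k)).take k = (pvIns v l).take k := by
  intro k
  induction k with
  | zero => intro l; simp
  | succ j ihk =>
    intro l
    cases l with
    | nil => rfl
    | cons a rest =>
      by_cases h : a ≤ v
      · rw [List.take_succ_cons, pvIns, pvIns, if_pos h, if_pos h,
            List.take_succ_cons, List.take_succ_cons, ihk]
      · rw [List.take_succ_cons, pvIns, pvIns, if_neg h, if_neg h,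
            List.take_succ_cons, List.take_succ_cons]
        congr 1
        cases j with
        | zero => simp
        | succ m => simp [List.take_succ_cons, List.take_take]

-- the one-pass bounded buffer is the take-3 of the full insertion sort
lemma foldl_pvStep_take (l : List Int) : ∀ acc : List Int,
    l.foldl pvStep (acc.take 3) = (l.foldl (fun s v => pvIns v s) acc).take 3 := by
  induction l with
  | nil => intro acc; rfl
  | cons v t ih =>
    intro acc
    have : pvStep (acc.take 3) v = (pvIns v acc).take 3 := by
      unfold pvStep; rw [take_pvIns]
    simp only [List.foldl_cons, this]
    exact ih (pvIns v acc)

lemma top_eq_take_sorted (notes : List Int) :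
    notes.foldl pvStep [] = (PySem.List.sorted notes (fun x => x) false).take 3 := by
  have h := foldl_pvStep_take notes []
  simp only [List.take_nil] at h
  rw [h, PySem.List.sorted_eq_foldl_insertBy]
  exact congrArg (List.take 3) (List.foldl_ext _ _ [] (fun acc b _ => pvIns_eq_insertBy b acc))

-- small-index reads through take 3 agree
lemma pyGetD_take3 (l : List Int) (i : Nat) (hi : i < 3) (d : Int) :
    PySem.List.pyGetD (l.take 3) (i : Int) d = PySem.List.pyGetD l (i : Int) d := by
  rw [PySem.List.pyGetD_natCast, PySem.List.pyGetD_natCast]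
  simp [List.getD, hi]

-- every char emitted by Nat.toDigitsCore base 10 is a decimal digit (or came from the accumulator)
lemma pv_toDigitsCore_digit :
    ∀ (f n : Nat) (acc : List Char), (∀ c ∈ acc, PySem.Chars.isdigit c = true) →
      ∀ c ∈ Nat.toDigitsCore 10 f n acc, PySem.Chars.isdigit c = true := by
  intro f
  induction f with
  | zero => intro n acc hacc c hc; exact hacc c hc
  | succ f ih =>
    intro n acc hacc c hc
    have hd : PySem.Chars.isdigit (Nat.digitChar (n % 10)) = true := by
      have h10 : n % 10 < 10 := Nat.mod_lt _ (by omega)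
      interval_cases h : (n % 10) <;> decide
    simp only [Nat.toDigitsCore] at hc
    split at hc
    · rcases List.mem_cons.mp hc with hc | hc
      · simp [hc, hd]
      · exact hacc c hc
    · refine ih _ _ ?_ c hc
      intro c' hc'
      rcases List.mem_cons.mp hc' with h | h
      · simp [h, hd]
      · exact hacc c' h

-- str(octave) survives nothing of A's filter: digits and '-' are all removed
lemma pv_filter_toChars (k : Int) : (PySem.Int.toChars k).filter pvKeep = [] := by
  rw [List.filter_eq_nil_iff]
  intro c hc
  have hdig : ∀ m : Nat, c ∈ Nat.toDigits 10 m → PySem.Chars.isdigit c = true := by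
    intro m hm
    exact pv_toDigitsCore_digit _ _ _ (by intro c' h; cases h) c hm
  simp only [PySem.Int.toChars] at hc
  split at hc
  · rcases List.mem_cons.mp hc with hc | hc
    · simp [hc, pvKeep]
    · have := hdig _ hc
      simp [pvKeep, this]
  · have := hdig _ hc
    simp [pvKeep, this]

-- A's strip-the-octave root naming equals B's direct NOTE_NAMES[midi % 12]
lemma pv_root_name (m : Int) :
    (pvNoteToName m).filter pvKeep = PySem.List.pyGetD pvNoteNamesB (PySem.Int.mod m 12) [] := by
  unfold pvNoteToName
  rw [List.filter_append, pv_filter_toChars, List.append_nil]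
  have h0 : 0 ≤ PySem.Int.mod m 12 := PySem.Int.mod_nonneg m (by omega)
  have h12 : PySem.Int.mod m 12 < 12 := PySem.Int.mod_lt m (by omega)
  generalize hr : PySem.Int.mod m 12 = r at h0 h12 ⊢
  interval_cases r <;> decide

theorem get_chord_name_spec_aux (notes : List Int) :
    get_chord_name notes = get_chord_name_alt notes := by
  unfold get_chord_name get_chord_name_alt
  by_cases hnil : notes = []
  · simp [hnil]
  · simp only [hnil, reduceIte]
    rw [pv_root_name, top_eq_take_sorted]
    set s := PySem.List.sorted notes (fun x => x) false with hs
    have hlen : notes.length = s.length := (PySem.List.length_sorted notes _ _).symm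
    rw [hlen]
    rw [show ((0:Int) = ((0:Nat):Int)) from rfl, show ((1:Int) = ((1:Nat):Int)) from rfl,
        show ((2:Int) = ((2:Nat):Int)) from rfl]
    rw [pyGetD_take3 s 0 (by omega), pyGetD_take3 s 1 (by omega), pyGetD_take3 s 2 (by omega)]
    simp only [Nat.cast_ofNat, Nat.cast_one, Nat.cast_zero]
    by_cases h1 : s.length = 1
    · simp [h1]
    · simp only [h1, reduceIte]
      by_cases h2 : s.length = 2
      · simp only [h2, reduceIte]
        set i := PySem.List.pyGetD s 1 0 - PySem.List.pyGetD s 0 0 with hi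
        by_cases e3 : i = 3
        · simp [e3, pvPair, PySem.Dict.getD, PySem.Dict.get?, PySem.Dict.insert, PySem.Dict.empty]
        · by_cases e4 : i = 4
          · simp [e4, pvPair, PySem.Dict.getD, PySem.Dict.get?, PySem.Dict.insert, PySem.Dict.empty]
          · by_cases e7 : i = 7
            · simp [e7, pvPair, PySem.Dict.getD, PySem.Dict.get?, PySem.Dict.insert, PySem.Dict.empty]
            · simp [e3, e4, e7, Ne.symm e3, Ne.symm e4, Ne.symm e7, pvPair,
                    PySem.Dict.getD, PySem.Dict.get?, PySem.Dict.insert, PySem.Dict.empty]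
      · have h3 : 3 ≤ s.length := by
          have : s ≠ [] := by
            rw [hs, Ne, PySem.List.sorted_eq_nil_iff]; exact hnil
          have : 1 ≤ s.length := List.length_pos_iff.mpr this
          omega
        simp only [h2, h3, reduceIte]
        set i1 := PySem.List.pyGetD s 1 0 - PySem.List.pyGetD s 0 0 with hi1
        set i2 := PySem.List.pyGetD s 2 0 - PySem.List.pyGetD s 1 0 with hi2
        by_cases c1 : i1 = 4 ∧ i2 = 3
        · simp [c1.1, c1.2, pvTriad, PySem.Dict.getD, PySem.Dict.get?, PySem.Dict.insert, PySem.Dict.empty]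
        · by_cases c2 : i1 = 3 ∧ i2 = 4
          · simp [c2.1, c2.2, pvTriad, PySem.Dict.getD, PySem.Dict.get?, PySem.Dict.insert, PySem.Dict.empty]
          · by_cases c3 : i1 = 5 ∧ i2 = 2
            · simp [c3.1, c3.2, pvTriad, PySem.Dict.getD, PySem.Dict.get?, PySem.Dict.insert, PySem.Dict.empty]
            · by_cases c4 : i1 = 2 ∧ i2 = 5
              · simp [c4.1, c4.2, pvTriad, PySem.Dict.getD, PySem.Dict.get?, PySem.Dict.insert, PySem.Dict.empty]
              · have n1 : ¬ (((4:Int), (3:Int)) = (i1, i2)) := by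
                  rw [Prod.mk.injEq]; rintro ⟨x1, x2⟩; exact c1 ⟨x1.symm, x2.symm⟩
                have n2 : ¬ (((3:Int), (4:Int)) = (i1, i2)) := by
                  rw [Prod.mk.injEq]; rintro ⟨x1, x2⟩; exact c2 ⟨x1.symm, x2.symm⟩
                have n3 : ¬ (((5:Int), (2:Int)) = (i1, i2)) := by
                  rw [Prod.mk.injEq]; rintro ⟨x1, x2⟩; exact c3 ⟨x1.symm, x2.symm⟩
                have n4 : ¬ (((2:Int), (5:Int)) = (i1, i2)) := by
                  rw [Prod.mk.injEq]; rintro ⟨x1, x2⟩; exact c4 ⟨x1.symm, x2.symm⟩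
                simp [c1, c2, c3, c4, n1, n2, n3, n4,
                      pvTriad, PySem.Dict.getD, PySem.Dict.get?, PySem.Dict.insert, PySem.Dict.empty]

-- ===== VERDICT (by name: the statement is the Claim_ definition above) =====
theorem get_chord_name_spec : Claim_equal_get_chord_name := by
  intro notes _
  unfold Spec_get_chord_name
  exact get_chord_name_spec_aux notes
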